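-- pv_equiv track=rewrite | github.com/mandanasmi/lane-slam | src/duckietown/include/duckietown_utils/text_utils.py | make_pagination
-- ===== SOURCE A (Python) =====
-- def make_pagination(rows, paginate):
--     if len(rows) < paginate:
--         return rows
--     else:
--         header = rows[0]
--         divider = rows[1]
--         rest = rows[2:]
--         pages = []
--         while rest:
--             n = min(len(rest), paginate)
--             pages.append(rest[:n])
--             rest = rest[n:]
--         result = []
--         spaces = [''] * len(header)
--         for i, p in enumerate(pages):
--             if i != 0:
--                 result.append(spaces)
--             result.append(header)
--             result.append(divider)
--             result.extend(p)
--         return result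
-- ===== SOURCE B (Python) =====
-- def make_pagination(rows, paginate):
--     if len(rows) < paginate:
--         return rows
--     header = rows[0]
--     divider = rows[1]
--     spaces = [''] * len(header)
--     result = []
--     for i, row in enumerate(rows[2:]):
--         if i % paginate == 0:
--             if i != 0:
--                 result.append(spaces)
--             result.append(header)
--             result.append(divider)
--         result.append(row)
--     return result
-- ===== Notes on version B (the rewrite author's own statement) =====
-- stated objective: alternative
-- what changed: B makes a single element-wise pass over rows[2:] with a modulo counter that emits spacer/header/divider at each page boundary, instead of first slicing the rows into a list of pages and then re-iterating that list; Pre_ excludes only inputs where A raises IndexError (fewer than 2 rows with len(rows) >= paginate) or loops forever (paginate <= 0 with more than 2 rows).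
import Mathlib
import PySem

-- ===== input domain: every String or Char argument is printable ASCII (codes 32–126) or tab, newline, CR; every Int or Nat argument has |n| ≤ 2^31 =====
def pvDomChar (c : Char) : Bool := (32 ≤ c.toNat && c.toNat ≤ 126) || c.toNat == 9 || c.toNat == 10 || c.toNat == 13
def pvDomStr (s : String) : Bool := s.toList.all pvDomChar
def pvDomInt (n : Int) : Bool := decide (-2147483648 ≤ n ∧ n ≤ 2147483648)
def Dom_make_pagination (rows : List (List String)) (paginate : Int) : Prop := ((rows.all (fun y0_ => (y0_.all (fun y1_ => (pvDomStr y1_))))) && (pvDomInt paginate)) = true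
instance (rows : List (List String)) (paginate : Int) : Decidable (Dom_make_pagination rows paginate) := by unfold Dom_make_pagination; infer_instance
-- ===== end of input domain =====

-- B paginates in one element-wise pass over rows[2:] with a modulo counter instead of
-- building a list of page slices and re-iterating it (objective: alternative decomposition).

-- ===== PORT A =====
-- the 'while rest:' loop; fuel = enough iterations (inside Pre_ each iteration removes ≥ 1 element);
-- fuel running out corresponds to the Python loop diverging (paginate ≤ 0 with nonempty rest), excluded by Pre_
def pvPagesLoop : Nat → List (List String) → Int → List (List (List String)) → List (List (List String))
  | 0, _, _, pages => pages
  | fuel + 1, rest, paginate, pages =>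
    if rest = [] then pages
    else
      let n : Int := min (rest.length : Int) paginate
      pvPagesLoop fuel (PySem.List.slice rest (some n) none) paginate
        (pages ++ [PySem.List.slice rest none (some n)])

-- body of A's 'for i, p in enumerate(pages):' loop
def pvStepA (spaces header divider : List String)
    (result : List (List String)) (ip : Int × List (List String)) : List (List String) :=
  (if ip.1 ≠ 0 then result ++ [spaces] else result) ++ [header, divider] ++ ip.2

def make_pagination (rows : List (List String)) (paginate : Int) : List (List String) :=
  if (rows.length : Int) < paginate then rows
  else
    -- rows[0] / rows[1] raise IndexError on fewer than 2 rows (excluded by Pre_); headD stands in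
    let header := rows.headD []
    let divider := rows.tail.headD []
    let rest := rows.drop 2
    let pages := pvPagesLoop (rest.length + 1) rest paginate []
    let spaces := List.replicate header.length ""
    (PySem.List.enumerate pages 0).foldl (pvStepA spaces header divider) []

-- ===== PORT B =====
-- body of B's 'for i, row in enumerate(rows[2:]):' loop
def pvStepB (paginate : Int) (spaces header divider : List String)
    (result : List (List String)) (ir : Int × List String) : List (List String) :=
  (if PySem.Int.mod ir.1 paginate = 0 then
     (if ir.1 ≠ 0 then result ++ [spaces] else result) ++ [header, divider]
   else result) ++ [ir.2]

def make_pagination_alt (rows : List (List String)) (paginate : Int) : List (List String) :=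
  if (rows.length : Int) < paginate then rows
  else
    -- rows[0] / rows[1] raise IndexError on fewer than 2 rows (excluded by Pre_); headD stands in
    let header := rows.headD []
    let divider := rows.tail.headD []
    let spaces := List.replicate header.length ""
    (PySem.List.enumerate (rows.drop 2) 0).foldl (pvStepB paginate spaces header divider) []

-- ===== PRECONDITION & SPEC =====
-- Pre_ excludes exactly the inputs where A does not return: IndexError (fewer than 2 rows with
-- len(rows) ≥ paginate) and divergence of the while-loop (paginate ≤ 0 with more than 2 rows).
def Pre_make_pagination (rows : List (List String)) (paginate : Int) : Prop :=
  (rows.length : Int) < paginate ∨ (2 ≤ rows.length ∧ (1 ≤ paginate ∨ rows.length = 2))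
instance (rows : List (List String)) (paginate : Int) : Decidable (Pre_make_pagination rows paginate) := by unfold Pre_make_pagination; infer_instance

def pvWitness_make_pagination : List (List String) × Int :=
  ([["id", "name"], ["--", "----"], ["1", "a"], ["2", "b"], ["3", "c"]], 2)

def Spec_make_pagination (rows : List (List String)) (paginate : Int) (out : List (List String)) : Prop := out = make_pagination_alt rows paginate
instance (rows : List (List String)) (paginate : Int) (out : List (List String)) : Decidable (Spec_make_pagination rows paginate out) := by unfold Spec_make_pagination; infer_instance

-- ===== CLAIM (what is proved, stated in full; the proofs are below) =====
def Claim_equal_make_pagination : Prop := ∀ (rows : List (List String)) (paginate : Int), Dom_make_pagination rows paginate → Pre_make_pagination rows paginate → Spec_make_pagination rows paginate (make_pagination rows paginate)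

-- ===== LEMMAS AND PROOFS =====

-- pages as chunks of size K+1 (proof reference; K+1 = paginate.toNat)
def pvChunks (K : Nat) (rest : List (List String)) : List (List (List String)) :=
  if h : rest = [] then []
  else rest.take (K + 1) :: pvChunks K (rest.drop (K + 1))
  termination_by rest.length
  decreasing_by
    have := List.length_pos_of_ne_nil h
    simp; omega

-- canonical paginated output (proof reference)
def pvPag (header divider spaces : List String) (K : Nat) (rest : List (List String)) :
    List (List String) :=
  if h : rest = [] then []
  else
    header :: divider :: (rest.take (K + 1) ++
      (if rest.drop (K + 1) = [] then []
       else spaces :: pvPag header divider spaces K (rest.drop (K + 1))))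
  termination_by rest.length
  decreasing_by
    have := List.length_pos_of_ne_nil h
    simp; omega

theorem pvTake_min (xs : List (List String)) (P : Nat) :
    xs.take (min xs.length P) = xs.take P := by
  rcases le_total P xs.length with h | h
  · rw [min_eq_right h]
  · rw [min_eq_left h, List.take_of_length_le h, List.take_length]

theorem pvDrop_min (xs : List (List String)) (P : Nat) :
    xs.drop (min xs.length P) = xs.drop P := by
  rcases le_total P xs.length with h | h
  · rw [min_eq_right h]
  · rw [min_eq_left h, List.drop_of_length_le h, List.drop_length]

theorem pvPagesLoop_eq (p : Int) (hp : 1 ≤ p) :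
    ∀ (fuel : Nat) (rest : List (List String)) (acc : List (List (List String))),
      rest.length < fuel →
      pvPagesLoop fuel rest p acc = acc ++ pvChunks (p.toNat - 1) rest := by
  intro fuel
  induction fuel with
  | zero => intro rest acc h; omega
  | succ f ih =>
    intro rest acc h
    match rest with
    | [] => simp [pvPagesLoop, pvChunks]
    | r :: rs =>
      rw [pvPagesLoop]
      simp only [reduceCtorEq, if_false]
      have hn0 : (0 : Int) ≤ min ((r :: rs).length : Int) p := by
        simp only [le_min_iff]; constructor <;> [positivity; omega]
      rw [PySem.List.slice_from _ hn0, PySem.List.slice_to _ hn0]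
      have htn : (min ((r :: rs).length : Int) p).toNat = min (r :: rs).length p.toNat := by
        omega
      rw [htn, pvTake_min, pvDrop_min]
      have hlt : ((r :: rs).drop p.toNat).length < f := by simp at h ⊢; omega
      rw [ih ((r :: rs).drop p.toNat) _ hlt]
      conv_rhs => rw [pvChunks]
      have hP : p.toNat - 1 + 1 = p.toNat := by omega
      simp [hP]

def pvFlatA (spaces header divider : List String) (ps : List (List (List String))) :
    List (List String) :=
  ps.flatMap (fun q => spaces :: header :: divider :: q)

theorem pvFoldA_from (sp h d : List String) :
    ∀ (ps : List (List (List String))) (k : Int) (acc : List (List String)),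
      1 ≤ k →
      (PySem.List.enumerate ps k).foldl (pvStepA sp h d) acc = acc ++ pvFlatA sp h d ps := by
  intro ps
  induction ps with
  | nil => intro k acc hk; simp [PySem.List.enumerate_nil, pvFlatA]
  | cons c cs ih =>
    intro k acc hk
    rw [PySem.List.enumerate_cons, List.foldl_cons, ih _ _ (by omega)]
    have hstep : pvStepA sp h d acc (k, c) = acc ++ (sp :: h :: d :: c) := by
      simp [pvStepA, show ¬ (k = 0) from by omega]
    rw [hstep]
    simp [pvFlatA]

theorem pvFlatA_chunks (sp h d : List String) (K : Nat) :
    ∀ (rest : List (List String)),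
      pvFlatA sp h d (pvChunks K rest) =
        if rest = [] then [] else sp :: pvPag h d sp K rest := by
  intro rest
  induction hn : rest.length using Nat.strong_induction_on generalizing rest with
  | _ n ih =>
    match rest with
    | [] => simp [pvChunks, pvFlatA]
    | r :: rs =>
      rw [pvChunks]
      simp only [reduceCtorEq, dite_false]
      have hstep : pvFlatA sp h d ((r :: rs).take (K + 1) :: pvChunks K ((r :: rs).drop (K + 1)))
          = (sp :: h :: d :: (r :: rs).take (K + 1)) ++ pvFlatA sp h d (pvChunks K ((r :: rs).drop (K + 1))) := by
        simp [pvFlatA]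
      rw [hstep, ih ((r :: rs).drop (K + 1)).length (by have := hn; simp at this ⊢; omega) _ rfl]
      conv_rhs => rw [if_neg (by simp), pvPag]
      simp only [reduceCtorEq, dite_false]
      by_cases hd : (r :: rs).drop (K + 1) = [] <;> simp [hd]

theorem pvFoldA_eq_pag (sp h d : List String) (K : Nat) (r : List String) (rs : List (List String)) :
    (PySem.List.enumerate (pvChunks K (r :: rs)) 0).foldl (pvStepA sp h d) [] =
      pvPag h d sp K (r :: rs) := by
  rw [pvChunks]
  simp only [reduceCtorEq, dite_false]
  rw [PySem.List.enumerate_cons, List.foldl_cons,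
      pvFoldA_from sp h d _ _ _ (by omega)]
  have h0 : pvStepA sp h d [] ((0 : Int), (r :: rs).take (K + 1)) = h :: d :: (r :: rs).take (K + 1) := by
    simp [pvStepA]
  rw [h0, pvFlatA_chunks]
  conv_rhs => rw [pvPag]
  simp only [reduceCtorEq, dite_false]
  by_cases hd : (r :: rs).drop (K + 1) = [] <;> simp [hd]

-- B side ---------------------------------------------------------------------

theorem pvNoTrig (p : Int) (sp h d : List String) (P : Nat) (hP : p = (P : Int)) :
    ∀ (c rs : List (List String)) (k : Nat) (acc : List (List String)),
      (∀ t, t < c.length → (k + t) % P ≠ 0) →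
      (PySem.List.enumerate (c ++ rs) (k : Int)).foldl (pvStepB p sp h d) acc =
        (PySem.List.enumerate rs ((k : Int) + c.length)).foldl (pvStepB p sp h d) (acc ++ c) := by
  intro c
  induction c with
  | nil => intro rs k acc _; simp
  | cons x c' ih =>
    intro rs k acc hno
    rw [List.cons_append, PySem.List.enumerate_cons, List.foldl_cons]
    have h0 : k % P ≠ 0 := by simpa using hno 0 (by simp)
    have hmod : PySem.Int.mod (k : Int) p ≠ 0 := by
      rw [hP, PySem.Int.mod_natCast]
      exact_mod_cast h0
    have hstep : pvStepB p sp h d acc ((k : Int), x) = acc ++ [x] := by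
      simp [pvStepB, hmod]
    rw [hstep]
    have hk1 : (k : Int) + 1 = ((k + 1 : Nat) : Int) := by push_cast; ring
    rw [hk1, ih rs (k + 1) (acc ++ [x])
      (by intro t ht
          have heq : k + 1 + t = k + (t + 1) := by omega
          rw [heq]
          exact hno (t + 1) (by simp; omega))]
    have hacc : (acc ++ [x]) ++ c' = acc ++ (x :: c') := by simp
    have hidx : ((k + 1 : Nat) : Int) + (c'.length : Int) = (k : Int) + ((x :: c').length : Int) := by
      simp; omega
    rw [hacc, hidx]

theorem pvFoldB_eq (p : Int) (sp h d : List String) (K : Nat) (hP : p = ((K + 1 : Nat) : Int)) :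
    ∀ (rest : List (List String)) (k : Nat) (acc : List (List String)),
      (K + 1) ∣ k →
      (PySem.List.enumerate rest (k : Int)).foldl (pvStepB p sp h d) acc =
        acc ++ (if rest = [] then [] else (if k = 0 then [] else [sp]) ++ pvPag h d sp K rest) := by
  intro rest
  induction hn : rest.length using Nat.strong_induction_on generalizing rest with
  | _ n ih =>
    intro k acc hdvd
    match rest with
    | [] => simp [PySem.List.enumerate_nil]
    | r :: rs =>
      rw [PySem.List.enumerate_cons, List.foldl_cons]
      have hkmod : k % (K + 1) = 0 := by
        obtain ⟨m, rfl⟩ := hdvd; simp [Nat.mul_mod_right]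
      have hmod : PySem.Int.mod (k : Int) p = 0 := by
        rw [hP, PySem.Int.mod_natCast]
        exact_mod_cast hkmod
      have hstep : pvStepB p sp h d acc ((k : Int), r)
          = ((acc ++ (if k = 0 then [] else [sp])) ++ [h, d]) ++ [r] := by
        by_cases hk : k = 0
        · subst hk
          simp only [pvStepB]
          rw [if_pos (by simpa using hmod)]
          simp
        · simp [pvStepB, hmod, hk]
      rw [hstep]
      -- walk the remainder of this page (indices k+1 .. k+K are not page boundaries)
      have hsplit : rs = rs.take K ++ rs.drop K := (List.take_append_drop K rs).symm
      have hk1 : (k : Int) + 1 = ((k + 1 : Nat) : Int) := by push_cast; ring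
      conv_lhs => rw [hsplit]
      rw [hk1, pvNoTrig p sp h d (K + 1) hP (rs.take K) (rs.drop K) (k + 1) _
        (by
          intro t ht
          have htK : t < K := lt_of_lt_of_le ht (by simpa using List.length_take_le K rs)
          obtain ⟨m, rfl⟩ := hdvd
          have heq : ((K + 1) * m + 1 + t) % (K + 1) = (1 + t) % (K + 1) := by
            conv_lhs => rw [add_assoc, Nat.add_comm ((K + 1) * m), Nat.add_mul_mod_self_left]
          rw [heq, Nat.mod_eq_of_lt (by omega)]
          omega)]
      have hlen : ((rs.take K).length : Int) = (min K rs.length : Nat) := by simp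
      by_cases hK : rs.length ≤ K
      · -- last page
        have hdr : rs.drop K = [] := List.drop_eq_nil_of_le hK
        have htk : rs.take K = rs := List.take_of_length_le hK
        rw [hdr, PySem.List.enumerate_nil, List.foldl_nil, htk]
        have hdr' : (r :: rs).drop (K + 1) = [] := by simpa using hdr
        conv_rhs => rw [if_neg (by simp), pvPag]
        simp [hdr', hK]
      · -- further pages follow
        push_neg at hK
        have hmin : min K rs.length = K := by omega
        have hidx : ((k + 1 : Nat) : Int) + ((rs.take K).length : Int) = ((k + (K + 1) : Nat) : Int) := by
          rw [hlen, hmin]; push_cast; ring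
        rw [hidx, ih (rs.drop K).length (by have := hn; simp at this ⊢; omega) _ rfl (k + (K + 1)) _
          (by obtain ⟨m, rfl⟩ := hdvd; exact ⟨m + 1, by ring⟩)]
        have hne : rs.drop K ≠ [] := by
          intro hcon
          have := List.drop_eq_nil_iff.mp hcon
          omega
        have hne' : (r :: rs).drop (K + 1) ≠ [] := by simpa using hne
        rw [if_neg hne, if_neg (show ¬ (k + (K+1) = 0) by omega)]
        conv_rhs => rw [if_neg (by simp), pvPag]
        simp only [reduceCtorEq, dite_false]
        have hdropped : (r :: rs).drop (K + 1) = rs.drop K := by simp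
        rw [hdropped, if_neg hne]
        simp

-- ===== VERDICT (by name: the statement is the Claim_ definition above) =====

theorem make_pagination_spec : Claim_equal_make_pagination := by
  intro rows p _ hpre
  unfold Spec_make_pagination make_pagination make_pagination_alt
  by_cases hg : (rows.length : Int) < p
  · simp [hg]
  · rw [if_neg hg, if_neg hg]
    rcases hpre with hlt | ⟨hlen2, hrest⟩
    · exact absurd hlt hg
    rcases rows with _ | ⟨h, _ | ⟨d, rest⟩⟩
    · simp at hlen2
    · simp at hlen2
    rcases rest with _ | ⟨r, rs⟩
    · simp [pvPagesLoop, PySem.List.enumerate_nil]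
    · have hp1 : 1 ≤ p := by
        rcases hrest with hp | habs
        · exact hp
        · simp at habs
      have hKdef : p = ((p.toNat - 1 + 1 : Nat) : Int) := by omega
      simp only [List.headD_cons, List.tail_cons, List.drop_succ_cons, List.drop_zero]
      rw [pvPagesLoop_eq p hp1 _ _ _ (by omega)]
      rw [List.nil_append, pvFoldA_eq_pag]
      rw [show (0 : Int) = ((0 : Nat) : Int) from rfl,
        pvFoldB_eq p (List.replicate h.length "") h d (p.toNat - 1) hKdef (r :: rs) 0 [] ⟨0, rfl⟩]
      simp
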